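-- pv_equiv track=rewrite | github.com/Niranjan-GopaL/Algorithm-Toolkits | Practise_Problems/Module_1/largest_lexicographical_rot_RB.py | largest_lex_rotation
-- ===== SOURCE A (Python) =====
-- d = 26
--
-- q = 100_001
--
-- def find_h(M):
--     h = 1
--     for i in range(M-1):
--         h = (h*d) % q
--     return h
--
-- def compute_hash(s):
--     p = 0
--     for i in range(len(s)):
--         p = (d*p + ord(s[i])) % q
--     return p
--
-- def largest_lex_rotation(s):
--     h = find_h(len(s))
--     s = s + s
--     # computing hash of first window
--     first_window_hash = compute_hash(s[:len(s) // 2])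
--     max_hash = rolling_hash = first_window_hash
--
--     max_idx = 0
--     # creating a slide window and finding rolling hashvalues
--     for i in range(len(s)//2 - 1):
--         rolling_hash = (d*(rolling_hash - ord(s[i])*h) + ord(s[i+len(s) // 2])) % q
--         if rolling_hash < 0:
--             rolling_hash = rolling_hash + q
--         if rolling_hash > max_hash:
--             max_hash = rolling_hash
--             max_idx = i
--
--     return s[max_idx : len(s)//2 - max_idx]
-- ===== SOURCE B (Python) =====
-- d = 26
--
-- q = 100_001
--
-- def compute_hash(s):
--     p = 0
--     for i in range(len(s)):
--         p = (d*p + ord(s[i])) % q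
--     return p
--
-- def largest_lex_rotation(s):
--     n = len(s)
--     t = s + s
--     max_hash = compute_hash(t[:n])
--     max_idx = 0
--     for i in range(n - 1):
--         hv = compute_hash(t[i+1 : i+1+n])
--         if hv > max_hash:
--             max_hash = hv
--             max_idx = i
--     return t[max_idx : n - max_idx]
-- ===== Notes on version B (the rewrite author's own statement) =====
-- stated objective: simpler
-- what changed: Drops find_h and the incremental rolling-hash update (with its dead negative-fixup branch) and instead recomputes each window's hash from scratch on the doubled string, keeping the same comparisons, recorded index and return slice.
import Mathlib
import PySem

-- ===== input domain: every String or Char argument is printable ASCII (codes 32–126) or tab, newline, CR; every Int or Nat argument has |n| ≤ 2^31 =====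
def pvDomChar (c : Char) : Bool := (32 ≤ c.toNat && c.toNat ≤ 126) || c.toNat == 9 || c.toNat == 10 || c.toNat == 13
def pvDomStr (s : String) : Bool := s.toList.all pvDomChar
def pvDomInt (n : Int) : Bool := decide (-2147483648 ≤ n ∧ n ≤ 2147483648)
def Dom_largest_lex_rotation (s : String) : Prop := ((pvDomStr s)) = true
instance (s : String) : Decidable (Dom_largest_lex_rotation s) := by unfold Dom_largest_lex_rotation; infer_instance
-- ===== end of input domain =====

-- B drops find_h and the incremental rolling-hash update (with its dead negative-fixup branch) and
-- recomputes each window's hash from scratch: simpler, same comparisons, recorded index and return slice.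

-- ===== PORT A =====
-- ord(c) (exact: the admitted characters are ASCII, and Char.toNat is the code point)
def pvOrd (c : Char) : Int := (c.toNat : Int)

-- find_h(M): h = 1; for i in range(M-1): h = (h*d) % q   (M = len(s) ≥ 0, so Nat 'M - 1' matches range(M-1))
def pvFindH (M : Nat) : Int :=
  (List.range (M - 1)).foldl (fun h _ => PySem.Int.mod (h * 26) 100001) 1

-- compute_hash(s): p = 0; for i in range(len(s)): p = (d*p + ord(s[i])) % q — the index loop reads
-- s[0..len-1] left to right, i.e. a fold over the characters.  (Source B contains the identical helper
-- verbatim; both ports share this one definition.)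
def pvComputeHash (cs : List Char) : Int :=
  cs.foldl (fun p c => PySem.Int.mod (26 * p + pvOrd c) 100001) 0

-- loop body of A: state (max_hash, rolling_hash, max_idx); t[i] and t[i+m] are in range for every
-- loop index, so List.getD is exact for Python's t[i]
def pvStepA (t : List Char) (m : Nat) (h : Int) (st : Int × Int × Nat) (i : Nat) : Int × Int × Nat :=
  let roll := PySem.Int.mod (26 * (st.2.1 - pvOrd (t.getD i ' ') * h) + pvOrd (t.getD (i + m) ' ')) 100001
  let roll := if roll < 0 then roll + 100001 else roll
  if roll > st.1 then (roll, roll, i) else (st.1, roll, st.2.2)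

def largest_lex_rotation (s : String) : String :=
  let h := pvFindH s.toList.length
  let t := s.toList ++ s.toList
  let m := t.length / 2                           -- len(s) // 2 after s = s + s
  let first := pvComputeHash (PySem.List.slice t none (some (m : Int)))
  let st := (List.range (m - 1)).foldl (pvStepA t m h) (first, first, 0)
  String.ofList (PySem.List.slice t (some ((st.2.2 : Nat) : Int)) (some ((m : Int) - ((st.2.2 : Nat) : Int))))

-- ===== PORT B =====
-- loop body of B: state (max_hash, max_idx); the hash of window t[i+1 : i+1+n] computed from scratch
def pvStepB (t : List Char) (n : Nat) (st : Int × Nat) (i : Nat) : Int × Nat :=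
  let hv := pvComputeHash (PySem.List.slice t (some ((i : Int) + 1)) (some ((i : Int) + 1 + (n : Int))))
  if hv > st.1 then (hv, i) else st

def largest_lex_rotation_alt (s : String) : String :=
  let n := s.toList.length
  let t := s.toList ++ s.toList
  let st := (List.range (n - 1)).foldl (pvStepB t n)
    (pvComputeHash (PySem.List.slice t none (some (n : Int))), 0)
  String.ofList (PySem.List.slice t (some ((st.2 : Nat) : Int)) (some ((n : Int) - ((st.2 : Nat) : Int))))

-- ===== PRECONDITION & SPEC =====
def Spec_largest_lex_rotation (s : String) (out : String) : Prop := out = largest_lex_rotation_alt s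
instance (s : String) (out : String) : Decidable (Spec_largest_lex_rotation s out) := by unfold Spec_largest_lex_rotation; infer_instance

-- ===== CLAIM (what is proved, stated in full; the proofs are below) =====
def Claim_equal_largest_lex_rotation : Prop := ∀ (s : String), Dom_largest_lex_rotation s → Spec_largest_lex_rotation s (largest_lex_rotation s)

-- ===== LEMMAS AND PROOFS =====

-- Python % by the positive modulus q = 100001 is Int.emod
theorem pvMod_eq (a : Int) : PySem.Int.mod a 100001 = a % 100001 :=
  PySem.Int.mod_eq_emod_of_pos (by norm_num)

-- the mod-free polynomial value of a hash
def pvPoly (cs : List Char) : Int := cs.foldl (fun p c => 26 * p + pvOrd c) 0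

theorem pvPoly_shift (cs : List Char) (p : Int) :
    cs.foldl (fun p c => 26 * p + pvOrd c) p = p * 26 ^ cs.length + pvPoly cs := by
  induction cs generalizing p with
  | nil => simp [pvPoly]
  | cons c cs ih =>
    simp only [List.foldl_cons, List.length_cons, pvPoly]
    rw [ih, ih (26 * 0 + pvOrd c)]
    ring

theorem pvHash_fold (cs : List Char) (p : Int) :
    cs.foldl (fun p c => PySem.Int.mod (26 * p + pvOrd c) 100001) (p % 100001)
      = if cs = [] then p % 100001 else (cs.foldl (fun p c => 26 * p + pvOrd c) p) % 100001 := by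
  induction cs generalizing p with
  | nil => simp
  | cons c cs ih =>
    have hinit : PySem.Int.mod (26 * (p % 100001) + pvOrd c) 100001
        = (26 * p + pvOrd c) % 100001 := by
      rw [pvMod_eq]
      conv_lhs => rw [Int.add_emod, Int.mul_emod, Int.emod_emod_of_dvd p dvd_rfl]
      conv_rhs => rw [Int.add_emod, Int.mul_emod]
    rw [List.foldl_cons, hinit, ih]
    cases cs <;> simp

theorem pvHash_eq_poly_mod (cs : List Char) : pvComputeHash cs = pvPoly cs % 100001 := by
  have := pvHash_fold cs 0
  simp only [Int.zero_emod] at this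
  rw [pvComputeHash, this]
  rcases eq_or_ne cs [] with h | h <;> simp [h, pvPoly]

theorem pvFindH_eq (k : Nat) : pvFindH (k + 1) = 26 ^ k % 100001 := by
  induction k with
  | zero => decide
  | succ k ih =>
    have : pvFindH (k + 1 + 1) = PySem.Int.mod (pvFindH (k + 1) * 26) 100001 := by
      simp [pvFindH, List.range_succ]
    rw [this, ih, pvMod_eq, Int.mul_emod, Int.emod_emod_of_dvd _ dvd_rfl, ← Int.mul_emod,
      pow_succ]

-- A's rolling update applied to a window's hash equals the from-scratch hash of the next window
theorem pvRoll_eq (a b : Char) (mid : List Char) :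
    PySem.Int.mod (26 * (pvComputeHash (a :: mid) - pvOrd a * (26 ^ mid.length % 100001)) + pvOrd b) 100001
      = pvComputeHash (mid ++ [b]) := by
  rw [pvMod_eq, pvHash_eq_poly_mod, pvHash_eq_poly_mod]
  have hpoly : pvPoly (a :: mid) = pvOrd a * 26 ^ mid.length + pvPoly mid := by
    simp only [pvPoly, List.foldl_cons]
    rw [pvPoly_shift]
    norm_num [pvPoly]
  have hsnoc : pvPoly (mid ++ [b]) = 26 * pvPoly mid + pvOrd b := by
    simp only [pvPoly, List.foldl_append, List.foldl_cons, List.foldl_nil]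
  rw [hpoly, hsnoc]
  have h1 : Int.ModEq 100001 (pvPoly (a :: mid) % 100001) (pvPoly (a :: mid)) :=
    Int.emod_emod_of_dvd _ dvd_rfl
  have h2 : Int.ModEq 100001 ((26:Int) ^ mid.length % 100001) (26 ^ mid.length) :=
    Int.emod_emod_of_dvd _ dvd_rfl
  have : Int.ModEq 100001
      (26 * (pvPoly (a :: mid) % 100001 - pvOrd a * (26 ^ mid.length % 100001)) + pvOrd b)
      (26 * (pvPoly (a :: mid) - pvOrd a * 26 ^ mid.length) + pvOrd b) :=
    ((h1.sub (h2.mul_left (pvOrd a))).mul_left 26).add_right (pvOrd b)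
  rw [hpoly] at this
  calc (26 * ((pvOrd a * 26 ^ mid.length + pvPoly mid) % 100001
          - pvOrd a * (26 ^ mid.length % 100001)) + pvOrd b) % 100001
      = (26 * (pvOrd a * 26 ^ mid.length + pvPoly mid - pvOrd a * 26 ^ mid.length) + pvOrd b)
          % 100001 := this
    _ = (26 * pvPoly mid + pvOrd b) % 100001 := by congr 1; ring

-- window decompositions on the doubled list
theorem pvWin_cons (t : List Char) (i m : Nat) (hi : i < t.length) (hm : 1 ≤ m) :
    (t.drop i).take m = t.getD i ' ' :: (t.drop (i + 1)).take (m - 1) := by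
  obtain ⟨m', rfl⟩ : ∃ m', m = m' + 1 := ⟨m - 1, by omega⟩
  rw [List.drop_eq_getElem_cons hi, List.take_cons, List.getD_eq_getElem _ _ hi]
  simp

theorem pvWin_snoc (t : List Char) (i m : Nat) (hm : 1 ≤ m) (hb : i + m < t.length) :
    (t.drop (i + 1)).take m = (t.drop (i + 1)).take (m - 1) ++ [t.getD (i + m) ' '] := by
  obtain ⟨m', rfl⟩ : ∃ m', m = m' + 1 := ⟨m - 1, by omega⟩
  rw [show i + (m' + 1) = i + 1 + m' from by omega, List.take_add_one]
  have hlt : m' < (t.drop (i + 1)).length := by simp; omega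
  rw [List.getElem?_eq_getElem hlt, List.getElem_drop,
    List.getD_eq_getElem _ _ (show i + 1 + m' < t.length from by omega)]
  simp

-- loop invariant: after k iterations A's rolling hash is the hash of window k, and A's
-- (max_hash, max_idx) agree with B's state
theorem pvLoop (l : List Char) (k : Nat) (hk : k ≤ l.length - 1) :
    ((List.range k).foldl (pvStepA (l ++ l) l.length (pvFindH l.length))
        (pvComputeHash ((l ++ l).take l.length), pvComputeHash ((l ++ l).take l.length), 0)).2.1
      = pvComputeHash (((l ++ l).drop k).take l.length) ∧
    ((List.range k).foldl (pvStepA (l ++ l) l.length (pvFindH l.length))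
        (pvComputeHash ((l ++ l).take l.length), pvComputeHash ((l ++ l).take l.length), 0)).1
      = ((List.range k).foldl (pvStepB (l ++ l) l.length)
        (pvComputeHash ((l ++ l).take l.length), 0)).1 ∧
    ((List.range k).foldl (pvStepA (l ++ l) l.length (pvFindH l.length))
        (pvComputeHash ((l ++ l).take l.length), pvComputeHash ((l ++ l).take l.length), 0)).2.2
      = ((List.range k).foldl (pvStepB (l ++ l) l.length)
        (pvComputeHash ((l ++ l).take l.length), 0)).2 := by
  set t := l ++ l with ht
  set m := l.length with hm
  have htlen : t.length = m + m := by simp [ht, hm]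
  induction k with
  | zero => simp
  | succ k ih =>
    have hm2 : 2 ≤ m := by omega
    obtain ⟨h1, h2, h3⟩ := ih (by omega)
    set mid := (t.drop (k + 1)).take (m - 1) with hmid
    have hmidlen : mid.length = m - 1 := by
      simp [hmid]; omega
    have hFindH : pvFindH m = 26 ^ (m - 1) % 100001 := by
      conv_lhs => rw [show m = (m - 1) + 1 from by omega]
      rw [pvFindH_eq]
    have hwc : (t.drop k).take m = t.getD k ' ' :: mid :=
      pvWin_cons t k m (by omega) (by omega)
    have hws : (t.drop (k + 1)).take m = mid ++ [t.getD (k + m) ' '] :=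
      pvWin_snoc t k m (by omega) (by omega)
    have hroll : PySem.Int.mod (26 * (pvComputeHash ((t.drop k).take m)
          - pvOrd (t.getD k ' ') * pvFindH m) + pvOrd (t.getD (k + m) ' ')) 100001
        = pvComputeHash ((t.drop (k + 1)).take m) := by
      rw [hFindH, hwc, ← hmidlen, pvRoll_eq, hws]
    have hhv : pvComputeHash (PySem.List.slice t (some ((k : Int) + 1)) (some ((k : Int) + 1 + (m : Int))))
        = pvComputeHash ((t.drop (k + 1)).take m) := by
      rw [show ((k : Int) + 1) = ((k + 1 : Nat) : Int) from by push_cast; ring]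
      rw [PySem.List.slice_natCast_add]
    have hnn : ¬ (pvComputeHash ((t.drop (k + 1)).take m) < 0) := by
      rw [pvHash_eq_poly_mod]
      have := Int.emod_nonneg (pvPoly ((t.drop (k + 1)).take m)) (show (100001:Int) ≠ 0 from by norm_num)
      omega
    simp only [List.range_succ, List.foldl_append, List.foldl_cons, List.foldl_nil]
    rw [pvStepA, pvStepB]
    simp only [h1, h2, h3, hroll, hhv, hnn, if_false]
    split_ifs <;> simp_all

theorem pvPorts_eq (s : String) : largest_lex_rotation s = largest_lex_rotation_alt s := by
  simp only [largest_lex_rotation, largest_lex_rotation_alt]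
  rw [show ((s.toList ++ s.toList).length / 2) = s.toList.length from by simp; omega]
  rw [PySem.List.slice_to_natCast]
  obtain ⟨-, -, h3⟩ := pvLoop s.toList (s.toList.length - 1) le_rfl
  rw [h3]

-- ===== VERDICT (by name: the statement is the Claim_ definition above) =====
theorem largest_lex_rotation_spec : Claim_equal_largest_lex_rotation := by
  intro s _
  unfold Spec_largest_lex_rotation
  exact pvPorts_eq s
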